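-- pv_equiv track=rewrite | github.com/proggeguden/nmiai | astar-island/ml_predictor.py | _precompute_coast_distances
-- ===== SOURCE A (Python) =====
-- def _precompute_coast_distances(initial_grid):
--     """Precompute BFS distance to nearest ocean cell for all cells.
--
--     Seeds BFS from all ocean cells (code=10), identical pattern to
--     _precompute_settlement_distances but for ocean cells.
--
--     Returns H×W list of lists with distances (999 if no ocean exists).
--     """
--     from collections import deque
--     H = len(initial_grid)
--     W = len(initial_grid[0])
--     dist = [[999] * W for _ in range(H)]
--     q = deque()
--     for r in range(H):
--         for c in range(W):
--             if initial_grid[r][c] == 10: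
--                 dist[r][c] = 0
--                 q.append((r, c))
--
--     if not q:
--         return dist
--
--     while q:
--         r, c = q.popleft()
--         for dr, dc in ((-1, 0), (1, 0), (0, -1), (0, 1)):
--             nr, nc = r + dr, c + dc
--             if 0 <= nr < H and 0 <= nc < W and dist[nr][nc] > dist[r][c] + 1:
--                 dist[nr][nc] = dist[r][c] + 1
--                 q.append((nr, nc))
--
--     return dist
-- ===== SOURCE B (Python) =====
-- def _precompute_coast_distances(initial_grid):
--     """Closed-form re-implementation: since every cell is passable, the BFS
--     distance equals the Manhattan (L1) distance to the nearest ocean cell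
--     (code 10), capped at 999 (999 if no ocean exists)."""
--     H = len(initial_grid)
--     W = len(initial_grid[0])
--     oceans = [(r, c) for r in range(H) for c in range(W)
--               if initial_grid[r][c] == 10]
--     result = []
--     for r in range(H):
--         row = []
--         for c in range(W):
--             best = 999
--             for orow, ocol in oceans:
--                 d = abs(r - orow) + abs(c - ocol)
--                 if d < best:
--                     best = d
--             row.append(best)
--         result.append(row)
--     return result
-- ===== Notes on version B (the rewrite author's own statement) =====
-- stated objective: simpler
-- what changed: Replaces the queue-based multi-source BFS relaxation with a direct closed form: since every cell is passable, the distance is the minimum Manhattan distance to an ocean cell, capped at 999.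
import Mathlib
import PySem

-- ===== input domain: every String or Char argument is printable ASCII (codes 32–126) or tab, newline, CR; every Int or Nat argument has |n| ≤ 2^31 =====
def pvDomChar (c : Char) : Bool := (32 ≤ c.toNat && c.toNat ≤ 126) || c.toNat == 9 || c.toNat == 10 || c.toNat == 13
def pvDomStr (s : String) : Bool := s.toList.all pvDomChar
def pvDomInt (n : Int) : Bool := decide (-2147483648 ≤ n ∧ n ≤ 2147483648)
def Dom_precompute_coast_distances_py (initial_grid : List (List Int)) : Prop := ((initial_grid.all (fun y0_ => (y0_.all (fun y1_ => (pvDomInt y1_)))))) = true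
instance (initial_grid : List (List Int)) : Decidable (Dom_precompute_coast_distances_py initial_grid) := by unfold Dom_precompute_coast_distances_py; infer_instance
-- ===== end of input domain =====

-- B replaces A's queue-based multi-source BFS by the closed form "minimum Manhattan distance to
-- an ocean cell (code 10), capped at 999" — every cell is passable, so the two agree; objective: simpler.

-- ===== PORT A =====
-- A-side helpers: 2-D read/write on the list-of-lists grid
def pvGet (d : List (List Int)) (r c : Nat) : Int := (d.getD r []).getD c 0

def pvSet (d : List (List Int)) (r c : Nat) (v : Int) : List (List Int) :=
  d.modify r (fun row => row.set c v)

def pvRelax (H W : Nat) (r c : Nat) (dq : List (List Int) × List (Nat × Nat)) (dd : Int × Int) :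
    List (List Int) × List (Nat × Nat) :=
  let nr : Int := (r : Int) + dd.1
  let nc : Int := (c : Int) + dd.2
  if 0 ≤ nr ∧ nr < (H : Int) ∧ 0 ≤ nc ∧ nc < (W : Int) ∧
      pvGet dq.1 r c + 1 < pvGet dq.1 nr.toNat nc.toNat then
    (pvSet dq.1 nr.toNat nc.toNat (pvGet dq.1 r c + 1), dq.2 ++ [(nr.toNat, nc.toNat)])
  else dq

def pvBfs (H W : Nat) : Nat → List (List Int) → List (Nat × Nat) → List (List Int)
  | 0, dist, _ => dist
  | _ + 1, dist, [] => dist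
  | fuel + 1, dist, (r, c) :: q =>
    let dq := [((-1 : Int), (0 : Int)), (1, 0), (0, -1), (0, 1)].foldl (pvRelax H W r c) (dist, q)
    pvBfs H W fuel dq.1 dq.2

def pvSeed (g : List (List Int)) : List (List Int) × List (Nat × Nat) :=
  (List.range g.length).foldl (fun st r =>
    (List.range (g.headD []).length).foldl (fun st c =>
      if pvGet g r c = 10 then (pvSet st.1 r c 0, st.2 ++ [(r, c)]) else st) st)
  (List.replicate g.length (List.replicate (g.headD []).length (999 : Int)), [])

def precompute_coast_distances_py (initial_grid : List (List Int)) : List (List Int) :=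
  let H := initial_grid.length
  let W := (initial_grid.headD []).length
  let seeded := pvSeed initial_grid
  if seeded.2 = [] then seeded.1
  else pvBfs H W (1000 * (H * W)) seeded.1 seeded.2

-- ===== PORT B =====
def precompute_coast_distances_py_alt (initial_grid : List (List Int)) : List (List Int) :=
  let H := initial_grid.length
  let W := (initial_grid.headD []).length
  let oceans := (List.range H).flatMap (fun r =>
    (List.range W).filterMap (fun c => if pvGet initial_grid r c = 10 then some (r, c) else none))
  (List.range H).map (fun (r : Nat) => (List.range W).map (fun (c : Nat) =>
    oceans.foldl (fun (best : Int) (o : Nat × Nat) =>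
      let d := |(r : Int) - (o.1 : Int)| + |(c : Int) - (o.2 : Int)|
      if d < best then d else best) 999))

-- ===== PRECONDITION & SPEC =====
-- Pre_ excludes exactly the inputs on which the Python A raises IndexError: the empty grid
-- (initial_grid[0]) and grids with a row shorter than the first row (initial_grid[r][c]);
-- B raises on the same inputs.
def Pre_precompute_coast_distances_py (initial_grid : List (List Int)) : Prop :=
  initial_grid ≠ [] ∧ ∀ row ∈ initial_grid, (initial_grid.headD []).length ≤ row.length
instance (initial_grid : List (List Int)) : Decidable (Pre_precompute_coast_distances_py initial_grid) := by unfold Pre_precompute_coast_distances_py; infer_instance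

def pvWitness_precompute_coast_distances_py : List (List Int) := [[10, 3], [0, 7]]

def Spec_precompute_coast_distances_py (initial_grid : List (List Int)) (out : List (List Int)) : Prop := out = precompute_coast_distances_py_alt initial_grid
instance (initial_grid : List (List Int)) (out : List (List Int)) : Decidable (Spec_precompute_coast_distances_py initial_grid out) := by unfold Spec_precompute_coast_distances_py; infer_instance

-- ===== CLAIM (what is proved, stated in full; the proofs are below) =====
def Claim_equal_precompute_coast_distances_py : Prop := ∀ (initial_grid : List (List Int)), Dom_precompute_coast_distances_py initial_grid → Pre_precompute_coast_distances_py initial_grid → Spec_precompute_coast_distances_py initial_grid (precompute_coast_distances_py initial_grid)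

-- ===== LEMMAS AND PROOFS =====
def pvW (g : List (List Int)) : Nat := (g.headD []).length

def pvOceans (g : List (List Int)) : List (Nat × Nat) :=
  (List.range g.length).flatMap (fun r =>
    (List.range (pvW g)).filterMap (fun c => if pvGet g r c = 10 then some (r, c) else none))

def pvT (g : List (List Int)) (r c : Nat) : Int :=
  (pvOceans g).foldl (fun best o => min best (|(r : Int) - (o.1 : Int)| + |(c : Int) - (o.2 : Int)|)) 999

def pvShape (H W : Nat) (d : List (List Int)) : Prop :=
  d.length = H ∧ ∀ row ∈ d, row.length = W

def pvAdj (r c r' c' : Nat) : Prop :=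
  ((r' : Int) = (r : Int) - 1 ∧ c' = c) ∨ ((r' : Int) = (r : Int) + 1 ∧ c' = c) ∨
  (r' = r ∧ (c' : Int) = (c : Int) - 1) ∨ (r' = r ∧ (c' : Int) = (c : Int) + 1)

def pvBounds (g : List (List Int)) (d : List (List Int)) : Prop :=
  ∀ r c, r < g.length → c < pvW g → pvT g r c ≤ pvGet d r c ∧ pvGet d r c ≤ 999

def pvOC (g : List (List Int)) (d : List (List Int)) : Prop :=
  ∀ r c, r < g.length → c < pvW g → pvGet g r c = 10 → pvGet d r c = 0

def pvQR (g : List (List Int)) (q : List (Nat × Nat)) : Prop :=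
  ∀ p ∈ q, p.1 < g.length ∧ p.2 < pvW g

def pvInv (g : List (List Int)) (d : List (List Int)) (q : List (Nat × Nat)) : Prop :=
  ∀ r c r' c', r < g.length → c < pvW g → r' < g.length → c' < pvW g → pvAdj r c r' c' →
    (pvGet d r' c' ≤ pvGet d r c + 1 ∨ pvGet d r c = 999 ∨ (r, c) ∈ q)

def pvM (d : List (List Int)) : Nat := (d.flatten.map Int.toNat).sum

theorem foldlMin_le_init {α : Type} (l : List α) (f : α → Int) (a : Int) :
    l.foldl (fun b x => min b (f x)) a ≤ a := by
  induction l generalizing a with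
  | nil => simp
  | cons x t ih => exact le_trans (ih _) (min_le_left _ _)

theorem foldlMin_le_mem {α : Type} (l : List α) (f : α → Int) (a : Int) {x : α} (hx : x ∈ l) :
    l.foldl (fun b x => min b (f x)) a ≤ f x := by
  induction l generalizing a with
  | nil => simp at hx
  | cons y t ih =>
    rcases List.mem_cons.1 hx with h | h
    · subst h; exact le_trans (foldlMin_le_init t f _) (min_le_right _ _)
    · exact ih _ h

theorem le_foldlMin {α : Type} (l : List α) (f : α → Int) (a k : Int) (ha : k ≤ a)
    (hf : ∀ x ∈ l, k ≤ f x) : k ≤ l.foldl (fun b x => min b (f x)) a := by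
  induction l generalizing a with
  | nil => simpa
  | cons y t ih =>
    exact ih _ (le_min ha (hf y (by simp))) (fun x hx => hf x (by simp [hx]))

theorem foldlMin_attained {α : Type} (l : List α) (f : α → Int) (a : Int) :
    l.foldl (fun b x => min b (f x)) a = a ∨ ∃ x ∈ l, l.foldl (fun b x => min b (f x)) a = f x := by
  induction l generalizing a with
  | nil => simp
  | cons y t ih =>
    rcases ih (min a (f y)) with h | ⟨x, hx, h⟩
    · rcases min_cases a (f y) with ⟨he, _⟩ | ⟨he, _⟩
      · left; simpa [he] using h
      · right; exact ⟨y, by simp, by simpa [he] using h⟩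
    · right; exact ⟨x, by simp [hx], by simpa using h⟩

theorem foldlMin_le_foldlMin_add {α : Type} (l : List α) (f f' : α → Int) (a b k : Int)
    (h0 : a ≤ b + k) (h : ∀ x ∈ l, f x ≤ f' x + k) :
    l.foldl (fun v x => min v (f x)) a ≤ l.foldl (fun v x => min v (f' x)) b + k := by
  induction l generalizing a b with
  | nil => simpa
  | cons y t ih =>
    refine ih _ _ ?_ (fun x hx => h x (by simp [hx]))
    have h1 := h y (by simp)
    beta_reduce
    omega

theorem pvGet_eq_getElem (d : List (List Int)) (r c : Nat) (hr : r < d.length)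
    (hc : c < d[r].length) : pvGet d r c = d[r][c] := by
  simp [pvGet, List.getD_eq_getElem?_getD, List.getElem?_eq_getElem, hr, hc]

theorem length_pvSet (d : List (List Int)) (x y : Nat) (v : Int) :
    (pvSet d x y v).length = d.length := by
  simp [pvSet]

theorem getElem?_pvSet (d : List (List Int)) (x y : Nat) (v : Int) (i : Nat) :
    (pvSet d x y v)[i]? = (fun row => if x = i then row.set y v else row) <$> d[i]? := by
  simp [pvSet, List.getElem?_modify]

theorem pvShape_pvSet {H W : Nat} {d : List (List Int)} (hsh : pvShape H W d) (x y : Nat) (v : Int) :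
    pvShape H W (pvSet d x y v) := by
  obtain ⟨h1, h2⟩ := hsh
  refine ⟨(length_pvSet d x y v).trans h1, fun row hrow => ?_⟩
  obtain ⟨i, hi, he⟩ := List.mem_iff_getElem.1 hrow
  have hi' : i < d.length := by simpa [length_pvSet] using hi
  have := getElem?_pvSet d x y v i
  rw [List.getElem?_eq_getElem hi, List.getElem?_eq_getElem hi'] at this
  simp only [Option.map_eq_map, Option.map_some, Option.some_inj] at this
  rw [← he, this]
  split
  · simp [h2 _ (List.getElem_mem hi')]
  · exact h2 _ (List.getElem_mem hi')

theorem pvGet_pvSet_same {H W : Nat} {d : List (List Int)} (hsh : pvShape H W d)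
    {x y : Nat} (hx : x < H) (hy : y < W) (v : Int) : pvGet (pvSet d x y v) x y = v := by
  obtain ⟨h1, h2⟩ := hsh
  have hx' : x < d.length := h1 ▸ hx
  have := getElem?_pvSet d x y v x
  rw [List.getElem?_eq_getElem hx'] at this
  have hrl : d[x].length = W := h2 _ (List.getElem_mem hx')
  simp only [pvGet, List.getD_eq_getElem?_getD, this]
  simp [List.getD_eq_getElem?_getD, List.getElem?_set, hy, hrl]

theorem pvGet_pvSet_ne (d : List (List Int)) (x y x' y' : Nat) (v : Int)
    (h : x ≠ x' ∨ y ≠ y') : pvGet (pvSet d x y v) x' y' = pvGet d x' y' := by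
  simp only [pvGet, List.getD_eq_getElem?_getD, getElem?_pvSet]
  rcases h with h | h
  · simp [if_neg h]
  · cases hd : d[x']? with
    | none => simp
    | some row =>
      simp only [Option.map_some, Option.getD_some]
      split
      · simp [List.getD_eq_getElem?_getD, List.getElem?_set, h]
      · rfl

theorem pvM_cons (row : List Int) (tl : List (List Int)) :
    pvM (row :: tl) = (row.map Int.toNat).sum + pvM tl := by
  simp [pvM]

theorem rowM_set_lt {row : List Int} {y : Nat} {v : Int} (hy : y < row.length)
    (hv : 0 ≤ v) (hlt : v < row.getD y 0) :
    ((row.set y v).map Int.toNat).sum + 1 ≤ (row.map Int.toNat).sum := by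
  induction row generalizing y with
  | nil => simp at hy
  | cons a t ih =>
    cases y with
    | zero =>
      simp only [List.set_cons_zero, List.map_cons, List.sum_cons]
      have : a = (a :: t).getD 0 0 := rfl
      omega
    | succ y =>
      simp only [List.set_cons_succ, List.map_cons, List.sum_cons]
      have := ih (y := y) (by simpa using hy) (by simpa using hlt)
      omega

theorem pvM_set_lt {d : List (List Int)} {x y : Nat} {v : Int}
    (hx : x < d.length) (hy : y < d[x].length) (hv : 0 ≤ v) (hlt : v < pvGet d x y) :
    pvM (pvSet d x y v) + 1 ≤ pvM d := by
  induction d generalizing x with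
  | nil => simp at hx
  | cons row tl ih =>
    cases x with
    | zero =>
      have : pvSet (row :: tl) 0 y v = (row.set y v) :: tl := by simp [pvSet, List.modify]
      rw [this, pvM_cons, pvM_cons]
      have hget : pvGet (row :: tl) 0 y = row.getD y 0 := rfl
      have := rowM_set_lt (row := row) (y := y) (v := v) (by simpa using hy) hv (hget ▸ hlt)
      omega
    | succ x =>
      have : pvSet (row :: tl) (x+1) y v = row :: pvSet tl x y v := by simp [pvSet, List.modify]
      rw [this, pvM_cons, pvM_cons]
      have := ih (x := x) (by simpa using hx) (by simpa using hy) (by simpa [pvGet] using hlt)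
      omega

theorem rowsum_le (row : List Int) (h : ∀ v ∈ row, v.toNat ≤ 999) :
    (row.map Int.toNat).sum ≤ 999 * row.length := by
  induction row with
  | nil => simp
  | cons a t ih =>
    simp only [List.map_cons, List.sum_cons, List.length_cons]
    have h1 := h a (by simp)
    have h2 := ih (fun v hv => h v (by simp [hv]))
    calc a.toNat + (t.map Int.toNat).sum ≤ 999 + 999 * t.length := by omega
    _ = 999 * (t.length + 1) := by ring

theorem pvM_le_aux (W : Nat) (d : List (List Int))
    (h : ∀ row ∈ d, (row.map Int.toNat).sum ≤ 999 * W) : pvM d ≤ 999 * (d.length * W) := by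
  induction d with
  | nil => simp [pvM]
  | cons row tl ih =>
    rw [pvM_cons]
    have h1 := h row (by simp)
    have h2 := ih (fun r hr => h r (by simp [hr]))
    simp only [List.length_cons]
    calc (row.map Int.toNat).sum + pvM tl ≤ 999 * W + 999 * (tl.length * W) := by omega
    _ = 999 * ((tl.length + 1) * W) := by ring

theorem pvM_le {H W : Nat} {d : List (List Int)} (hsh : pvShape H W d)
    (hb : ∀ r c, r < H → c < W → pvGet d r c ≤ 999) : pvM d ≤ 999 * (H * W) := by
  obtain ⟨h1, h2⟩ := hsh
  have hrow : ∀ row ∈ d, (row.map Int.toNat).sum ≤ 999 * W := by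
    intro row hrow
    have hlen := h2 row hrow
    rw [← hlen]
    apply rowsum_le
    intro v hv
    obtain ⟨i, hi, rfl⟩ := List.mem_iff_getElem.1 hrow
    obtain ⟨j, hj, rfl⟩ := List.mem_iff_getElem.1 hv
    have hget := hb i j (by omega) (by omega)
    rw [pvGet_eq_getElem d i j hi hj] at hget
    omega
  have := pvM_le_aux W d hrow
  rw [h1] at this
  exact this

theorem mem_pvOceans (g : List (List Int)) (p : Nat × Nat) :
    p ∈ pvOceans g ↔ p.1 < g.length ∧ p.2 < pvW g ∧ pvGet g p.1 p.2 = 10 := by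
  obtain ⟨r, c⟩ := p
  simp only [pvOceans, List.mem_flatMap, List.mem_filterMap, List.mem_range]
  constructor
  · rintro ⟨a, ha, b, hb, hab⟩
    split at hab
    · obtain ⟨rfl, rfl⟩ := Prod.mk.injEq .. ▸ Option.some_inj.1 hab
      exact ⟨ha, hb, by assumption⟩
    · simp at hab
  · rintro ⟨h1, h2, h3⟩
    exact ⟨r, h1, c, h2, by simp [h3]⟩

theorem pvT_le_999 (g : List (List Int)) (r c : Nat) : pvT g r c ≤ 999 :=
  foldlMin_le_init _ _ _

theorem pvT_nonneg (g : List (List Int)) (r c : Nat) : 0 ≤ pvT g r c := by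
  refine le_foldlMin _ _ _ _ (by norm_num) (fun o _ => ?_)
  positivity

theorem pvT_le_dist (g : List (List Int)) (r c : Nat) {o : Nat × Nat} (ho : o ∈ pvOceans g) :
    pvT g r c ≤ |(r : Int) - (o.1 : Int)| + |(c : Int) - (o.2 : Int)| :=
  foldlMin_le_mem _ _ _ ho

theorem pvAdj_dist (r c r' c' : Nat) (h : pvAdj r c r' c') :
    |(r : Int) - (r' : Int)| + |(c : Int) - (c' : Int)| = 1 := by
  simp only [Int.abs_eq_natAbs]
  rcases h with ⟨h1, h2⟩ | ⟨h1, h2⟩ | ⟨h1, h2⟩ | ⟨h1, h2⟩ <;>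
    (first | (subst h2) | skip) <;> omega

theorem pvT_adj (g : List (List Int)) {r c r' c' : Nat} (h : pvAdj r c r' c') :
    pvT g r' c' ≤ pvT g r c + 1 := by
  have hd := pvAdj_dist r c r' c' h
  refine foldlMin_le_foldlMin_add _ _ _ _ _ _ (by norm_num) (fun o _ => ?_)
  have t1 := abs_sub_le ((r' : Int)) ((r : Int)) ((o.1 : Int))
  have t2 := abs_sub_le ((c' : Int)) ((c : Int)) ((o.2 : Int))
  have e1 : |(r' : Int) - (r : Int)| = |(r : Int) - (r' : Int)| := abs_sub_comm _ _
  have e2 : |(c' : Int) - (c : Int)| = |(c : Int) - (c' : Int)| := abs_sub_comm _ _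
  omega

theorem ocean_step (g : List (List Int)) (r c : Nat) (hr : r < g.length) (hc : c < pvW g)
    {o : Nat × Nat} (ho : o ∈ pvOceans g) (k : Int) (hk0 : 0 ≤ k)
    (hk : |(r : Int) - (o.1 : Int)| + |(c : Int) - (o.2 : Int)| = k + 1) :
    ∃ r' c', r' < g.length ∧ c' < pvW g ∧ pvAdj r' c' r c ∧ pvT g r' c' ≤ k := by
  obtain ⟨ho1, ho2, _⟩ := (mem_pvOceans g o).1 ho
  simp only [Int.abs_eq_natAbs] at hk
  rcases lt_trichotomy (o.1) r with h | h | h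
  · refine ⟨r - 1, c, by omega, hc, Or.inr (Or.inl ⟨by omega, rfl⟩), ?_⟩
    have h5 := pvT_le_dist g (r - 1) c ho
    simp only [Int.abs_eq_natAbs] at h5
    omega
  · rcases lt_trichotomy (o.2) c with h2 | h2 | h2
    · refine ⟨r, c - 1, hr, by omega, Or.inr (Or.inr (Or.inr ⟨rfl, by omega⟩)), ?_⟩
      have h5 := pvT_le_dist g r (c - 1) ho
      simp only [Int.abs_eq_natAbs] at h5
      omega
    · omega
    · refine ⟨r, c + 1, hr, by omega, Or.inr (Or.inr (Or.inl ⟨rfl, by omega⟩)), ?_⟩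
      have h5 := pvT_le_dist g r (c + 1) ho
      simp only [Int.abs_eq_natAbs] at h5
      omega
  · refine ⟨r + 1, c, by omega, hc, Or.inl ⟨by omega, rfl⟩, ?_⟩
    have h5 := pvT_le_dist g (r + 1) c ho
    simp only [Int.abs_eq_natAbs] at h5
    omega

theorem pvT_attained (g : List (List Int)) (r c : Nat) :
    pvT g r c = 999 ∨ ∃ o ∈ pvOceans g, pvT g r c = |(r : Int) - (o.1 : Int)| + |(c : Int) - (o.2 : Int)| := by
  simpa [pvT] using foldlMin_attained (pvOceans g)
    (fun o => |(r : Int) - (o.1 : Int)| + |(c : Int) - (o.2 : Int)|) 999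

theorem complete_of_stable (g : List (List Int)) (d : List (List Int))
    (hoc : pvOC g d) (hub : ∀ r c, r < g.length → c < pvW g → pvGet d r c ≤ 999)
    (hexit : pvInv g d []) :
    ∀ (k : Nat) (r c : Nat), r < g.length → c < pvW g → pvT g r c ≤ k →
      pvGet d r c ≤ pvT g r c := by
  intro k
  induction k with
  | zero =>
    intro r c hr hc hT
    have h0 : pvT g r c = 0 := le_antisymm (by exact_mod_cast hT) (pvT_nonneg g r c)
    rcases pvT_attained g r c with h | ⟨o, ho, h⟩
    · omega
    · have hoeq : o = (r, c) := by
        have hd0 : |(r : Int) - (o.1 : Int)| + |(c : Int) - (o.2 : Int)| = 0 := by omega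
        simp only [Int.abs_eq_natAbs] at hd0
        obtain ⟨x, y⟩ := o
        simp only [Prod.mk.injEq]
        constructor <;> omega
      subst hoeq
      obtain ⟨_, _, hoce⟩ := (mem_pvOceans g _).1 ho
      rw [h0]
      exact le_of_eq (hoc r c hr hc hoce)
  | succ k ih =>
    intro r c hr hc hT
    by_cases hk : pvT g r c ≤ k
    · exact ih r c hr hc hk
    · have hTe : pvT g r c = (k : Int) + 1 := by push_cast at hT ⊢; omega
      by_cases h999 : (k : Int) + 1 = 999
      · rw [hTe, h999]; exact hub r c hr hc
      · have hklt : (k : Int) + 1 < 999 := by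
          have := pvT_le_999 g r c; omega
        rcases pvT_attained g r c with h | ⟨o, ho, h⟩
        · omega
        · obtain ⟨r', c', hr', hc', hadj, hTn⟩ :=
            ocean_step g r c hr hc ho k (by positivity) (by omega)
          have hn : pvGet d r' c' ≤ (k : Int) :=
            le_trans (ih r' c' hr' hc' hTn) hTn
          rcases hexit r' c' r c hr' hc' hr hc hadj with hx | hx | hx
          · omega
          · omega
          · simp at hx

theorem adj_of_dd (r c : Nat) (dd : Int × Int)
    (hdd : dd = (-1, 0) ∨ dd = (1, 0) ∨ dd = (0, -1) ∨ dd = (0, 1))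
    (h1 : 0 ≤ (r : Int) + dd.1) (h3 : 0 ≤ (c : Int) + dd.2) :
    pvAdj r c ((r : Int) + dd.1).toNat ((c : Int) + dd.2).toNat ∧
      (((r : Int) + dd.1).toNat ≠ r ∨ ((c : Int) + dd.2).toNat ≠ c) := by
  rcases hdd with rfl | rfl | rfl | rfl <;>
    simp only [pvAdj] <;>
    constructor
  · exact Or.inl ⟨by omega, by omega⟩
  · left; omega
  · exact Or.inr (Or.inl ⟨by omega, by omega⟩)
  · left; omega
  · exact Or.inr (Or.inr (Or.inl ⟨by omega, by omega⟩))
  · right; omega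
  · exact Or.inr (Or.inr (Or.inr ⟨by omega, by omega⟩))
  · right; omega

theorem relax_step (g : List (List Int)) (d : List (List Int)) (q : List (Nat × Nat))
    (r c : Nat) (dd : Int × Int)
    (hdd : dd = (-1, 0) ∨ dd = (1, 0) ∨ dd = (0, -1) ∨ dd = (0, 1))
    (hr : r < g.length) (hc : c < pvW g)
    (hsh : pvShape g.length (pvW g) d) (hb : pvBounds g d) (hoc : pvOC g d) (hqr : pvQR g q) :
    pvShape g.length (pvW g) (pvRelax g.length (pvW g) r c (d, q) dd).1 ∧
    pvBounds g (pvRelax g.length (pvW g) r c (d, q) dd).1 ∧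
    pvOC g (pvRelax g.length (pvW g) r c (d, q) dd).1 ∧
    pvQR g (pvRelax g.length (pvW g) r c (d, q) dd).2 ∧
    (∀ x y, pvGet (pvRelax g.length (pvW g) r c (d, q) dd).1 x y ≤ pvGet d x y) ∧
    (∀ p ∈ q, p ∈ (pvRelax g.length (pvW g) r c (d, q) dd).2) ∧
    (∀ x y, x < g.length → y < pvW g →
      pvGet (pvRelax g.length (pvW g) r c (d, q) dd).1 x y < pvGet d x y →
      (x, y) ∈ (pvRelax g.length (pvW g) r c (d, q) dd).2) ∧
    pvGet (pvRelax g.length (pvW g) r c (d, q) dd).1 r c = pvGet d r c ∧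
    ((0 ≤ (r : Int) + dd.1 ∧ (r : Int) + dd.1 < (g.length : Int) ∧
      0 ≤ (c : Int) + dd.2 ∧ (c : Int) + dd.2 < (pvW g : Int)) →
      pvGet (pvRelax g.length (pvW g) r c (d, q) dd).1 ((r : Int) + dd.1).toNat ((c : Int) + dd.2).toNat ≤
        pvGet (pvRelax g.length (pvW g) r c (d, q) dd).1 r c + 1) ∧
    pvM (pvRelax g.length (pvW g) r c (d, q) dd).1 + (pvRelax g.length (pvW g) r c (d, q) dd).2.length ≤
      pvM d + q.length := by
  by_cases hco : (0 ≤ (r : Int) + dd.1 ∧ (r : Int) + dd.1 < (g.length : Int) ∧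
      0 ≤ (c : Int) + dd.2 ∧ (c : Int) + dd.2 < (pvW g : Int) ∧
      pvGet d r c + 1 < pvGet d ((r : Int) + dd.1).toNat ((c : Int) + dd.2).toNat)
  · obtain ⟨h1, h2, h3, h4, h5⟩ := hco
    have hres : pvRelax g.length (pvW g) r c (d, q) dd =
        (pvSet d ((r : Int) + dd.1).toNat ((c : Int) + dd.2).toNat (pvGet d r c + 1),
          q ++ [(((r : Int) + dd.1).toNat, ((c : Int) + dd.2).toNat)]) := by
      simp only [pvRelax]
      rw [if_pos ⟨h1, h2, h3, h4, h5⟩]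
    set a := ((r : Int) + dd.1).toNat with ha_def
    set b := ((c : Int) + dd.2).toNat with hb_def
    rw [hres]
    dsimp only
    obtain ⟨hl1, hl2⟩ := hsh
    have hsh : pvShape g.length (pvW g) d := ⟨hl1, hl2⟩
    have had : a < d.length := by omega
    have haH : a < g.length := by omega
    have hbW : b < pvW g := by omega
    obtain ⟨hadj, hne⟩ := adj_of_dd r c dd hdd h1 h3
    have hnnrc : 0 ≤ pvGet d r c := le_trans (pvT_nonneg g r c) (hb r c hr hc).1
    have hvnn : 0 ≤ pvGet d r c + 1 := by omega
    have hget_same : ∀ v, pvGet (pvSet d a b v) a b = v := fun v =>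
      pvGet_pvSet_same hsh haH hbW v
    have hget_ne : ∀ x y, (x ≠ a ∨ y ≠ b) → pvGet (pvSet d a b (pvGet d r c + 1)) x y = pvGet d x y :=
      fun x y hxy => pvGet_pvSet_ne d a b x y _ (by tauto)
    have hsrc : pvGet (pvSet d a b (pvGet d r c + 1)) r c = pvGet d r c := by
      apply hget_ne; tauto
    refine ⟨pvShape_pvSet hsh a b _, ?_, ?_, ?_, ?_, ?_, ?_, hsrc, ?_, ?_⟩
    · intro x y hx hy
      by_cases hxy : x = a ∧ y = b
      · obtain ⟨rfl, rfl⟩ := hxy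
        rw [hget_same]
        constructor
        · exact le_trans (pvT_adj g hadj) (by have := (hb r c hr hc).1; omega)
        · have := (hb a b haH hbW).2; omega
      · rw [hget_ne x y (by tauto)]; exact hb x y hx hy
    · intro x y hx hy hoce
      by_cases hxy : x = a ∧ y = b
      · obtain ⟨rfl, rfl⟩ := hxy
        have := hoc a b haH hbW hoce
        omega
      · rw [hget_ne x y (by tauto)]; exact hoc x y hx hy hoce
    · intro p hp
      rcases List.mem_append.1 hp with hp | hp
      · exact hqr p hp
      · simp at hp; subst hp; exact ⟨haH, hbW⟩
    · intro x y
      by_cases hxy : x = a ∧ y = b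
      · obtain ⟨rfl, rfl⟩ := hxy; rw [hget_same]; omega
      · rw [hget_ne x y (by tauto)]
    · intro p hp; exact List.mem_append.2 (Or.inl hp)
    · intro x y hx hy hlt
      by_cases hxy : x = a ∧ y = b
      · obtain ⟨rfl, rfl⟩ := hxy; simp
      · rw [hget_ne x y (by tauto)] at hlt; omega
    · intro _
      rw [hget_same, hsrc]
    · have hyd : b < (d[a]'had).length := by
        rw [hl2 _ (List.getElem_mem had)]; exact hbW
      have := pvM_set_lt (d := d) (x := a) (y := b) (v := pvGet d r c + 1) had hyd hvnn h5
      simp only [List.length_append, List.length_cons, List.length_nil]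
      omega
  · have hres : pvRelax g.length (pvW g) r c (d, q) dd = (d, q) := by
      simp only [pvRelax]
      rw [if_neg hco]
    rw [hres]
    dsimp only
    refine ⟨hsh, hb, hoc, hqr, fun x y => le_refl _, fun p hp => hp, fun x y _ _ h => by omega,
      rfl, ?_, le_refl _⟩
    intro ⟨h1, h2, h3, h4⟩
    by_contra hlt
    exact hco ⟨h1, h2, h3, h4, by omega⟩

set_option maxHeartbeats 1000000 in
theorem body_step (g : List (List Int)) (d : List (List Int)) (q : List (Nat × Nat))
    (r c : Nat) (hr : r < g.length) (hc : c < pvW g)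
    (hsh : pvShape g.length (pvW g) d) (hb : pvBounds g d) (hoc : pvOC g d) (hqr : pvQR g q) :
    pvShape g.length (pvW g) ([((-1 : Int), (0 : Int)), (1, 0), (0, -1), (0, 1)].foldl (pvRelax g.length (pvW g) r c) (d, q)).1 ∧
    pvBounds g ([((-1 : Int), (0 : Int)), (1, 0), (0, -1), (0, 1)].foldl (pvRelax g.length (pvW g) r c) (d, q)).1 ∧
    pvOC g ([((-1 : Int), (0 : Int)), (1, 0), (0, -1), (0, 1)].foldl (pvRelax g.length (pvW g) r c) (d, q)).1 ∧
    pvQR g ([((-1 : Int), (0 : Int)), (1, 0), (0, -1), (0, 1)].foldl (pvRelax g.length (pvW g) r c) (d, q)).2 ∧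
    (∀ x y, pvGet ([((-1 : Int), (0 : Int)), (1, 0), (0, -1), (0, 1)].foldl (pvRelax g.length (pvW g) r c) (d, q)).1 x y ≤ pvGet d x y) ∧
    (∀ p ∈ q, p ∈ ([((-1 : Int), (0 : Int)), (1, 0), (0, -1), (0, 1)].foldl (pvRelax g.length (pvW g) r c) (d, q)).2) ∧
    (∀ x y, x < g.length → y < pvW g →
      pvGet ([((-1 : Int), (0 : Int)), (1, 0), (0, -1), (0, 1)].foldl (pvRelax g.length (pvW g) r c) (d, q)).1 x y < pvGet d x y →
      (x, y) ∈ ([((-1 : Int), (0 : Int)), (1, 0), (0, -1), (0, 1)].foldl (pvRelax g.length (pvW g) r c) (d, q)).2) ∧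
    (∀ r' c', r' < g.length → c' < pvW g → pvAdj r c r' c' →
      pvGet ([((-1 : Int), (0 : Int)), (1, 0), (0, -1), (0, 1)].foldl (pvRelax g.length (pvW g) r c) (d, q)).1 r' c' ≤
        pvGet ([((-1 : Int), (0 : Int)), (1, 0), (0, -1), (0, 1)].foldl (pvRelax g.length (pvW g) r c) (d, q)).1 r c + 1) ∧
    pvM ([((-1 : Int), (0 : Int)), (1, 0), (0, -1), (0, 1)].foldl (pvRelax g.length (pvW g) r c) (d, q)).1 +
      ([((-1 : Int), (0 : Int)), (1, 0), (0, -1), (0, 1)].foldl (pvRelax g.length (pvW g) r c) (d, q)).2.length ≤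
      pvM d + q.length := by
  simp only [List.foldl_cons, List.foldl_nil]
  obtain ⟨h1sh, h1b, h1oc, h1qr, h1mono, h1sub, h1chg, h1src, h1nb, h1M⟩ :=
    relax_step g d q r c (-1, 0) (Or.inl rfl) hr hc hsh hb hoc hqr
  set s1 := pvRelax g.length (pvW g) r c (d, q) (-1, 0) with hs1
  obtain ⟨h2sh, h2b, h2oc, h2qr, h2mono, h2sub, h2chg, h2src, h2nb, h2M⟩ :=
    relax_step g s1.1 s1.2 r c (1, 0) (Or.inr (Or.inl rfl)) hr hc h1sh h1b h1oc h1qr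
  have he1 : ((s1.1, s1.2) : List (List Int) × List (Nat × Nat)) = s1 := rfl
  rw [he1] at h2sh h2b h2oc h2qr h2mono h2sub h2chg h2src h2nb h2M
  set s2 := pvRelax g.length (pvW g) r c s1 (1, 0) with hs2
  obtain ⟨h3sh, h3b, h3oc, h3qr, h3mono, h3sub, h3chg, h3src, h3nb, h3M⟩ :=
    relax_step g s2.1 s2.2 r c (0, -1) (Or.inr (Or.inr (Or.inl rfl))) hr hc h2sh h2b h2oc h2qr
  have he2 : ((s2.1, s2.2) : List (List Int) × List (Nat × Nat)) = s2 := rfl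
  rw [he2] at h3sh h3b h3oc h3qr h3mono h3sub h3chg h3src h3nb h3M
  set s3 := pvRelax g.length (pvW g) r c s2 (0, -1) with hs3
  obtain ⟨h4sh, h4b, h4oc, h4qr, h4mono, h4sub, h4chg, h4src, h4nb, h4M⟩ :=
    relax_step g s3.1 s3.2 r c (0, 1) (Or.inr (Or.inr (Or.inr rfl))) hr hc h3sh h3b h3oc h3qr
  have he3 : ((s3.1, s3.2) : List (List Int) × List (Nat × Nat)) = s3 := rfl
  rw [he3] at h4sh h4b h4oc h4qr h4mono h4sub h4chg h4src h4nb h4M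
  set s4 := pvRelax g.length (pvW g) r c s3 (0, 1) with hs4
  have mono41 : ∀ x y, pvGet s4.1 x y ≤ pvGet s1.1 x y :=
    fun x y => le_trans (h4mono x y) (le_trans (h3mono x y) (h2mono x y))
  have mono42 : ∀ x y, pvGet s4.1 x y ≤ pvGet s2.1 x y :=
    fun x y => le_trans (h4mono x y) (h3mono x y)
  have sub24 : ∀ p ∈ s2.2, p ∈ s4.2 := fun p hp => h4sub p (h3sub p hp)
  have sub14 : ∀ p ∈ s1.2, p ∈ s4.2 := fun p hp => sub24 p (h2sub p hp)
  have sub04 : ∀ p ∈ q, p ∈ s4.2 := fun p hp => sub14 p (h1sub p hp)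
  have src41 : pvGet s4.1 r c = pvGet d r c := by
    rw [h4src, h3src, h2src, h1src]
  refine ⟨h4sh, h4b, h4oc, h4qr, ?_, sub04, ?_, ?_, ?_⟩
  · intro x y
    exact le_trans (mono41 x y) (h1mono x y)
  · intro x y hx hy hlt
    by_cases c4 : pvGet s4.1 x y < pvGet s3.1 x y
    · exact h4chg x y hx hy c4
    · have e4 : pvGet s4.1 x y = pvGet s3.1 x y := le_antisymm (h4mono x y) (by omega)
      by_cases c3 : pvGet s3.1 x y < pvGet s2.1 x y
      · exact h4sub _ (h3chg x y hx hy c3)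
      · have e3 : pvGet s3.1 x y = pvGet s2.1 x y := le_antisymm (h3mono x y) (by omega)
        by_cases c2 : pvGet s2.1 x y < pvGet s1.1 x y
        · exact h4sub _ (h3sub _ (h2chg x y hx hy c2))
        · have e2 : pvGet s2.1 x y = pvGet s1.1 x y := le_antisymm (h2mono x y) (by omega)
          have c1 : pvGet s1.1 x y < pvGet d x y := by omega
          exact sub14 _ (h1chg x y hx hy c1)
  · intro r' c' hr' hc' hadj
    rcases hadj with ⟨e1, e2⟩ | ⟨e1, e2⟩ | ⟨e1, e2⟩ | ⟨e1, e2⟩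
    · have hnb := h1nb ⟨by omega, by omega, by omega, by omega⟩
      have ex : ((r : Int) + (-1, (0:Int)).1).toNat = r' := by simp; omega
      have ey : ((c : Int) + ((-1:Int), (0:Int)).2).toNat = c' := by simp; omega
      rw [ex, ey] at hnb
      have := mono41 r' c'
      have e5 : pvGet s4.1 r c = pvGet s1.1 r c := by rw [src41, h1src]
      omega
    · have hnb := h2nb ⟨by omega, by omega, by omega, by omega⟩
      have ex : ((r : Int) + ((1:Int), (0:Int)).1).toNat = r' := by simp; omega
      have ey : ((c : Int) + ((1:Int), (0:Int)).2).toNat = c' := by simp; omega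
      rw [ex, ey] at hnb
      have := mono42 r' c'
      have e5 : pvGet s4.1 r c = pvGet s2.1 r c := by rw [src41, h2src, h1src]
      omega
    · have hnb := h3nb ⟨by omega, by omega, by omega, by omega⟩
      have ex : ((r : Int) + ((0:Int), (-1:Int)).1).toNat = r' := by simp; omega
      have ey : ((c : Int) + ((0:Int), (-1:Int)).2).toNat = c' := by simp; omega
      rw [ex, ey] at hnb
      have := h4mono r' c'
      have e5 : pvGet s4.1 r c = pvGet s3.1 r c := by rw [src41, h3src, h2src, h1src]
      omega
    · have hnb := h4nb ⟨by omega, by omega, by omega, by omega⟩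
      have ex : ((r : Int) + ((0:Int), (1:Int)).1).toNat = r' := by simp; omega
      have ey : ((c : Int) + ((0:Int), (1:Int)).2).toNat = c' := by simp; omega
      rw [ex, ey] at hnb
      omega
  · omega

theorem bfs_spec (g : List (List Int)) : ∀ (fuel : Nat) (d : List (List Int)) (q : List (Nat × Nat)),
    pvShape g.length (pvW g) d → pvBounds g d → pvOC g d → pvQR g q → pvInv g d q →
    pvM d + q.length ≤ fuel →
    pvShape g.length (pvW g) (pvBfs g.length (pvW g) fuel d q) ∧
    pvBounds g (pvBfs g.length (pvW g) fuel d q) ∧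
    pvOC g (pvBfs g.length (pvW g) fuel d q) ∧
    pvInv g (pvBfs g.length (pvW g) fuel d q) [] := by
  intro fuel
  induction fuel with
  | zero =>
    intro d q hsh hb hoc hqr hinv hM
    have hq : q = [] := by
      cases q with
      | nil => rfl
      | cons p t => simp at hM
    subst hq
    exact ⟨hsh, hb, hoc, fun r c r' c' h1 h2 h3 h4 h5 => hinv r c r' c' h1 h2 h3 h4 h5⟩
  | succ fuel ih =>
    intro d q hsh hb hoc hqr hinv hM
    cases q with
    | nil => exact ⟨hsh, hb, hoc, fun r c r' c' h1 h2 h3 h4 h5 => hinv r c r' c' h1 h2 h3 h4 h5⟩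
    | cons p q' =>
      obtain ⟨r, c⟩ := p
      obtain ⟨hr, hc⟩ := hqr (r, c) (List.mem_cons_self ..)
      have hqr' : pvQR g q' := fun p hp => hqr p (List.mem_cons_of_mem _ hp)
      obtain ⟨hsh4, hb4, hoc4, hqr4, hmono4, hsub4, hchg4, hnb4, hM4⟩ :=
        body_step g d q' r c hr hc hsh hb hoc hqr'
      have heq : pvBfs g.length (pvW g) (fuel + 1) d ((r, c) :: q') =
          pvBfs g.length (pvW g) fuel
            ([((-1 : Int), (0 : Int)), (1, 0), (0, -1), (0, 1)].foldl (pvRelax g.length (pvW g) r c) (d, q')).1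
            ([((-1 : Int), (0 : Int)), (1, 0), (0, -1), (0, 1)].foldl (pvRelax g.length (pvW g) r c) (d, q')).2 := rfl
      rw [heq]
      set st := [((-1 : Int), (0 : Int)), (1, 0), (0, -1), (0, 1)].foldl (pvRelax g.length (pvW g) r c) (d, q') with hst
      apply ih st.1 st.2 hsh4 hb4 hoc4 hqr4
      · -- pvInv st.1 st.2
        intro x y x' y' hx hy hx' hy' hadj
        by_cases hxy : x = r ∧ y = c
        · obtain ⟨rfl, rfl⟩ := hxy
          exact Or.inl (hnb4 x' y' hx' hy' hadj)
        · rcases hinv x y x' y' hx hy hx' hy' hadj with hcase | hcase | hcase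
          · by_cases hch : pvGet st.1 x y < pvGet d x y
            · exact Or.inr (Or.inr (hchg4 x y hx hy hch))
            · have hxe : pvGet st.1 x y = pvGet d x y :=
                le_antisymm (hmono4 x y) (by omega)
              exact Or.inl (by have := hmono4 x' y'; omega)
          · by_cases hch : pvGet st.1 x y < pvGet d x y
            · exact Or.inr (Or.inr (hchg4 x y hx hy hch))
            · have hxe : pvGet st.1 x y = pvGet d x y :=
                le_antisymm (hmono4 x y) (by omega)
              exact Or.inr (Or.inl (by omega))
          · rcases List.mem_cons.1 hcase with hh | hh
            · exact absurd (Prod.mk.injEq .. ▸ hh) (by simpa using hxy)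
            · exact Or.inr (Or.inr (hsub4 _ hh))
      · -- measure
        have : q'.length + 1 = ((r, c) :: q').length := by simp
        omega

theorem foldl_pair_split {α β γ : Type} (l : List α) (p : α → Prop) [DecidablePred p]
    (f : β → α → β) (h : γ → α → γ) (st : β × γ) :
    l.foldl (fun st x => if p x then (f st.1 x, h st.2 x) else st) st =
      (l.foldl (fun b x => if p x then f b x else b) st.1,
       l.foldl (fun q x => if p x then h q x else q) st.2) := by
  induction l generalizing st with
  | nil => rfl
  | cons a t ih =>
    simp only [List.foldl_cons]
    by_cases hp : p a
    · rw [if_pos hp, if_pos hp, if_pos hp, ih]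
    · rw [if_neg hp, if_neg hp, if_neg hp, ih]

theorem fold_setrow (g : List (List Int)) {H W : Nat} (r : Nat) (cs : List Nat)
    (d : List (List Int)) (hsh : pvShape H W d) (hr : r < H) (hcs : ∀ c ∈ cs, c < W) :
    pvShape H W (cs.foldl (fun d c => if pvGet g r c = 10 then pvSet d r c 0 else d) d) ∧
    ∀ x y, pvGet (cs.foldl (fun d c => if pvGet g r c = 10 then pvSet d r c 0 else d) d) x y =
      if x = r ∧ y ∈ cs ∧ pvGet g r y = 10 then 0 else pvGet d x y := by
  induction cs generalizing d with
  | nil => exact ⟨hsh, fun x y => by simp⟩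
  | cons a t ih =>
    have hat : a < W := hcs a (by simp)
    have hts : ∀ c ∈ t, c < W := fun c hc => hcs c (by simp [hc])
    simp only [List.foldl_cons]
    by_cases hpa : pvGet g r a = 10
    · rw [if_pos hpa]
      obtain ⟨ihsh, ihget⟩ := ih (pvSet d r a 0) (pvShape_pvSet hsh r a 0) hts
      refine ⟨ihsh, fun x y => ?_⟩
      rw [ihget x y]
      split_ifs with h1 h2 h2
      · rfl
      · exact absurd ⟨h1.1, List.mem_cons_of_mem _ h1.2.1, h1.2.2⟩ h2
      · obtain ⟨rfl, hmem, hpy⟩ := h2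
        rcases List.mem_cons.1 hmem with rfl | hyt
        · exact pvGet_pvSet_same hsh hr hat 0
        · exact absurd ⟨rfl, hyt, hpy⟩ h1
      · apply pvGet_pvSet_ne
        by_cases hx : x = r
        · subst hx
          by_cases hy : y = a
          · subst hy; exact absurd ⟨rfl, by simp, hpa⟩ h2
          · exact Or.inr (Ne.symm hy)
        · exact Or.inl (Ne.symm hx)
    · rw [if_neg hpa]
      obtain ⟨ihsh, ihget⟩ := ih d hsh hts
      refine ⟨ihsh, fun x y => ?_⟩
      rw [ihget x y]
      split_ifs with h1 h2 h2
      · rfl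
      · exact absurd ⟨h1.1, List.mem_cons_of_mem _ h1.2.1, h1.2.2⟩ h2
      · obtain ⟨rfl, hmem, hpy⟩ := h2
        rcases List.mem_cons.1 hmem with rfl | hyt
        · exact absurd hpy hpa
        · exact absurd ⟨rfl, hyt, hpy⟩ h1
      · rfl

theorem fold_seed_outer (g : List (List Int)) {H W : Nat} (rs : List Nat)
    (st : List (List Int) × List (Nat × Nat)) (hsh : pvShape H W st.1) (hrs : ∀ r ∈ rs, r < H) :
    pvShape H W (rs.foldl (fun st r => (List.range W).foldl (fun st c =>
        if pvGet g r c = 10 then (pvSet st.1 r c 0, st.2 ++ [(r, c)]) else st) st) st).1 ∧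
    (∀ x y, pvGet (rs.foldl (fun st r => (List.range W).foldl (fun st c =>
        if pvGet g r c = 10 then (pvSet st.1 r c 0, st.2 ++ [(r, c)]) else st) st) st).1 x y =
      if x ∈ rs ∧ y ∈ List.range W ∧ pvGet g x y = 10 then 0 else pvGet st.1 x y) ∧
    (rs.foldl (fun st r => (List.range W).foldl (fun st c =>
        if pvGet g r c = 10 then (pvSet st.1 r c 0, st.2 ++ [(r, c)]) else st) st) st).2 =
      st.2 ++ rs.flatMap (fun r =>
        ((List.range W).filter (fun c => decide (pvGet g r c = 10))).map (fun c => (r, c))) := by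
  induction rs generalizing st with
  | nil => exact ⟨hsh, fun x y => by simp, by simp⟩
  | cons a t ih =>
    have haH : a < H := hrs a (by simp)
    have htH : ∀ r ∈ t, r < H := fun r hr => hrs r (by simp [hr])
    simp only [List.foldl_cons]
    rw [foldl_pair_split (List.range W) (fun c => pvGet g a c = 10)
      (fun b c => pvSet b a c 0) (fun q c => q ++ [(a, c)]) st]
    obtain ⟨rsh, rget⟩ := fold_setrow g a (List.range W) st.1 hsh haH (fun c hc => List.mem_range.1 hc)
    obtain ⟨osh, oget, oq⟩ := ih (_, _) rsh htH
    refine ⟨osh, fun x y => ?_, ?_⟩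
    · rw [oget x y]
      show _ = if x ∈ a :: t ∧ y ∈ List.range W ∧ pvGet g x y = 10 then 0 else pvGet st.1 x y
      split_ifs with h1 h2 h2
      · rfl
      · exact absurd ⟨List.mem_cons_of_mem _ h1.1, h1.2⟩ h2
      · rw [rget x y]
        obtain ⟨hmem, hyW, hpy⟩ := h2
        rcases List.mem_cons.1 hmem with rfl | hxt
        · rw [if_pos ⟨rfl, hyW, hpy⟩]
        · exact absurd ⟨hxt, hyW, hpy⟩ h1
      · rw [rget x y]
        rw [if_neg ?_]
        rintro ⟨rfl, hyW, hpy⟩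
        exact h2 ⟨by simp, hyW, hpy⟩
    · rw [oq]
      show _ = st.2 ++ _
      rw [PySem.List.foldl_append_ite (fun c => pvGet g a c = 10) (fun c => (a, c)) (List.range W) st.2]
      simp [List.flatMap_cons, List.append_assoc]

theorem sum_len_le {α : Type} (rs : List Nat) (f : Nat → List α) (W : Nat)
    (hf : ∀ r, (f r).length ≤ W) : (rs.flatMap f).length ≤ rs.length * W := by
  induction rs with
  | nil => simp
  | cons a t ih =>
    simp only [List.flatMap_cons, List.length_append, List.length_cons]
    have := hf a
    calc (f a).length + (t.flatMap f).length ≤ W + t.length * W := by omega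
    _ = (t.length + 1) * W := by ring

theorem seed_spec (g : List (List Int)) :
    pvShape g.length (pvW g) (pvSeed g).1 ∧
    (∀ r c, r < g.length → c < pvW g →
      pvGet (pvSeed g).1 r c = if pvGet g r c = 10 then 0 else 999) ∧
    (∀ p, p ∈ (pvSeed g).2 ↔ p.1 < g.length ∧ p.2 < pvW g ∧ pvGet g p.1 p.2 = 10) ∧
    (pvSeed g).2.length ≤ g.length * pvW g := by
  have hsh0 : pvShape g.length (pvW g) (List.replicate g.length (List.replicate (pvW g) (999 : Int))) := by
    refine ⟨by simp, fun row hrow => ?_⟩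
    rw [List.eq_of_mem_replicate hrow]; simp
  obtain ⟨osh, oget, oq⟩ := fold_seed_outer g (H := g.length) (W := pvW g) (List.range g.length)
    (List.replicate g.length (List.replicate (pvW g) (999 : Int)), []) hsh0
    (fun r hr => List.mem_range.1 hr)
  have hseed : pvSeed g = (List.range g.length).foldl (fun st r =>
      (List.range (pvW g)).foldl (fun st c =>
        if pvGet g r c = 10 then (pvSet st.1 r c 0, st.2 ++ [(r, c)]) else st) st)
      (List.replicate g.length (List.replicate (pvW g) (999 : Int)), []) := rfl
  rw [hseed]
  refine ⟨osh, fun r c hr hc => ?_, fun p => ?_, ?_⟩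
  · rw [oget r c]
    have hbase : pvGet (List.replicate g.length (List.replicate (pvW g) (999 : Int))) r c = 999 := by
      simp [pvGet, List.getD_eq_getElem?_getD, List.getElem?_replicate, hr, hc]
    split_ifs with h1 h2 h2
    · rfl
    · exact absurd h1.2.2 h2
    · exact absurd ⟨List.mem_range.2 hr, List.mem_range.2 hc, h2⟩ h1
    · exact hbase
  · rw [oq]
    simp only [List.nil_append, List.mem_flatMap, List.mem_map, List.mem_filter,
      List.mem_range, decide_eq_true_eq]
    constructor
    · rintro ⟨r, hr, c, ⟨hc, hp⟩, rfl⟩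
      exact ⟨hr, hc, hp⟩
    · rintro ⟨h1, h2, h3⟩
      exact ⟨p.1, h1, p.2, ⟨h2, h3⟩, rfl⟩
  · rw [oq]
    simp only [List.nil_append]
    have := sum_len_le (List.range g.length)
      (fun r => ((List.range (pvW g)).filter (fun c => decide (pvGet g r c = 10))).map (fun c => (r, c)))
      (pvW g) (fun r => by
        calc (((List.range (pvW g)).filter (fun c => decide (pvGet g r c = 10))).map (fun c => (r, c))).length
            = ((List.range (pvW g)).filter (fun c => decide (pvGet g r c = 10))).length := List.length_map ..
          _ ≤ (List.range (pvW g)).length := List.length_filter_le _ _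
          _ = pvW g := List.length_range)
    simpa using this

theorem alt_eq (g : List (List Int)) :
    precompute_coast_distances_py_alt g =
      (List.range g.length).map (fun r => (List.range (pvW g)).map (fun c => pvT g r c)) := by
  have hstep : ∀ (r c : Nat),
      (fun (best : Int) (o : Nat × Nat) =>
        if |(r : Int) - (o.1 : Int)| + |(c : Int) - (o.2 : Int)| < best
        then |(r : Int) - (o.1 : Int)| + |(c : Int) - (o.2 : Int)| else best) =
      (fun (best : Int) (o : Nat × Nat) => min best (|(r : Int) - (o.1 : Int)| + |(c : Int) - (o.2 : Int)|)) := by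
    intro r c
    funext b o
    simp only [min_def]
    split_ifs <;> omega
  unfold precompute_coast_distances_py_alt pvT pvOceans pvW
  dsimp only
  refine List.map_congr_left fun r hr => ?_
  refine List.map_congr_left fun c hc => ?_
  rw [hstep r c]

theorem grid_ext (g : List (List Int)) (d : List (List Int))
    (hsh : pvShape g.length (pvW g) d)
    (hval : ∀ r c, r < g.length → c < pvW g → pvGet d r c = pvT g r c) :
    d = (List.range g.length).map (fun r => (List.range (pvW g)).map (fun c => pvT g r c)) := by
  obtain ⟨h1, h2⟩ := hsh
  apply List.ext_getElem
  · simp [h1]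
  · intro i hi1 hi2
    have hiH : i < g.length := by omega
    rw [List.getElem_map]
    apply List.ext_getElem
    · simp [h2 d[i] (List.getElem_mem hi1)]
    · intro j hj1 hj2
      have hjW : j < pvW g := by
        have := h2 d[i] (List.getElem_mem hi1)
        omega
      rw [List.getElem_map]
      rw [← pvGet_eq_getElem d i j hi1 hj1, hval i j hiH hjW]
      congr 1
      · simp [List.getElem_range]
      · simp [List.getElem_range]

theorem main_thm : ∀ (g : List (List Int)), Pre_precompute_coast_distances_py g →
    precompute_coast_distances_py g = precompute_coast_distances_py_alt g := by
  intro g _hpre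
  rw [alt_eq]
  obtain ⟨ssh, sget, smem, slen⟩ := seed_spec g
  have hporta : precompute_coast_distances_py g =
      if (pvSeed g).2 = [] then (pvSeed g).1
      else pvBfs g.length (pvW g) (1000 * (g.length * pvW g)) (pvSeed g).1 (pvSeed g).2 := rfl
  rw [hporta]
  by_cases hq : (pvSeed g).2 = []
  · rw [if_pos hq]
    -- no ocean: everything is 999 and pvT is 999
    have hnoc : pvOceans g = [] := by
      rw [List.eq_nil_iff_forall_not_mem]
      intro p hp
      have := (mem_pvOceans g p).1 hp
      have := (smem p).2 this
      rw [hq] at this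
      simp at this
    have hT : ∀ r c : Nat, pvT g r c = 999 := by
      intro r c; rw [pvT, hnoc]; rfl
    apply grid_ext g _ ssh
    intro r c hr hc
    rw [sget r c hr hc, hT r c]
    have hno10 : ¬ pvGet g r c = 10 := by
      intro h10
      have := (smem (r, c)).2 ⟨hr, hc, h10⟩
      rw [hq] at this
      simp at this
    rw [if_neg hno10]
  · rw [if_neg hq]
    -- invariants at the seeded state
    have hb0 : pvBounds g (pvSeed g).1 := by
      intro r c hr hc
      rw [sget r c hr hc]
      split_ifs with h10
      · refine ⟨?_, by norm_num⟩
        have hmem : ((r, c) : Nat × Nat) ∈ pvOceans g := (mem_pvOceans g (r, c)).2 ⟨hr, hc, h10⟩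
        have := pvT_le_dist g r c hmem
        simpa using this
      · exact ⟨pvT_le_999 g r c, le_refl _⟩
    have hoc0 : pvOC g (pvSeed g).1 := by
      intro r c hr hc h10
      rw [sget r c hr hc, if_pos h10]
    have hqr0 : pvQR g (pvSeed g).2 := by
      intro p hp
      have := (smem p).1 hp
      exact ⟨this.1, this.2.1⟩
    have hinv0 : pvInv g (pvSeed g).1 (pvSeed g).2 := by
      intro r c r' c' hr hc hr' hc' hadj
      by_cases h10 : pvGet g r c = 10
      · exact Or.inr (Or.inr ((smem (r, c)).2 ⟨hr, hc, h10⟩))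
      · exact Or.inr (Or.inl (by rw [sget r c hr hc, if_neg h10]))
    have hub0 : ∀ r c, r < g.length → c < pvW g → pvGet (pvSeed g).1 r c ≤ 999 :=
      fun r c hr hc => (hb0 r c hr hc).2
    have hM0 : pvM (pvSeed g).1 + (pvSeed g).2.length ≤ 1000 * (g.length * pvW g) := by
      have h1 := pvM_le ssh hub0
      have h2 := slen
      omega
    obtain ⟨fsh, fb, foc, finv⟩ :=
      bfs_spec g (1000 * (g.length * pvW g)) (pvSeed g).1 (pvSeed g).2 ssh hb0 hoc0 hqr0 hinv0 hM0
    apply grid_ext g _ fsh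
    intro r c hr hc
    have hle : pvGet (pvBfs g.length (pvW g) (1000 * (g.length * pvW g)) (pvSeed g).1 (pvSeed g).2) r c ≤ pvT g r c := by
      apply complete_of_stable g _ foc (fun r c h1 h2 => (fb r c h1 h2).2) finv (pvT g r c).toNat r c hr hc
      have := pvT_nonneg g r c
      omega
    exact le_antisymm hle (fb r c hr hc).1

-- ===== VERDICT (by name: the statement is the Claim_ definition above) =====
theorem precompute_coast_distances_py_spec : Claim_equal_precompute_coast_distances_py := by
  intro initial_grid _hdom hpre
  unfold Spec_precompute_coast_distances_py
  exact main_thm initial_grid hpre
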